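-- pv_equiv track=rewrite | github.com/smilehat403/for-coding-test | [Pro][Lv1]mocktest.py | solution
-- ===== SOURCE A (Python) =====
-- def solution(answers):
--     answer = []
--     score1 = 0  # 1 2 3 4 5
--     score2 = 0  # 2 1 2 3 2 4 2 5
--     score3 = 0  # 3 3 1 1 2 2 4 4 5 5
--
--     answer1 = [1,2,3,4,5]; len1 = len(answer1)
--     answer2 = [2,1,2,3,2,4,2,5]; len2 = len(answer2)
--     answer3 = [3,3,1,1,2,2,4,4,5,5]; len3 = len(answer3)
--
--     for i in range(len(answers)):
--         if answer1[i%len1] == answers[i]: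
--             score1 += 1
--         if answer2[i%len2] == answers[i]:
--             score2 += 1
--         if answer3[i%len3] == answers[i]:
--             score3 += 1
--
--     scores = [score1,score2,score3]
--
--     for person, score in enumerate(scores):
--         if score == max(scores):
--             answer.append(person+1)
--
--
--     return answer # 가장 많은 문제를 맞힌 사람, 여럿일 경우 오름차순 정렬
-- ===== SOURCE B (Python) =====
-- def solution(answers):
--     P1 = [1, 2, 3, 4, 5]
--     P2 = [2, 1, 2, 3, 2, 4, 2, 5]
--     P3 = [3, 3, 1, 1, 2, 2, 4, 4, 5, 5]
--     # Bucket the answer sheet once by position mod 40 (lcm of the pattern lengths):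
--     # cnt[(r, v)] = how many positions i have i % 40 == r and answers[i] == v.
--     cnt = {}
--     for i, a in enumerate(answers):
--         k = (i % 40, a)
--         cnt[k] = cnt.get(k, 0) + 1
--     # A guesser's score is then just 40 bucket lookups, with no pass over answers.
--     scores = [sum(cnt.get((r, p[r % len(p)]), 0) for r in range(40)) for p in (P1, P2, P3)]
--     m = max(scores)
--     return [i + 1 for i in range(3) if scores[i] == m]
-- ===== Notes on version B (the rewrite author's own statement) =====
-- stated objective: alternative
-- what changed: Instead of comparing every answer against each cyclic pattern (A's single loop with three modular-index comparisons per answer), B buckets the answer sheet once into a dict keyed by (index mod 40, given answer) - 40 being the lcm of the three pattern lengths - and then computes each guesser's score as 40 dictionary lookups with no further pass over the answers.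
import Mathlib
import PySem

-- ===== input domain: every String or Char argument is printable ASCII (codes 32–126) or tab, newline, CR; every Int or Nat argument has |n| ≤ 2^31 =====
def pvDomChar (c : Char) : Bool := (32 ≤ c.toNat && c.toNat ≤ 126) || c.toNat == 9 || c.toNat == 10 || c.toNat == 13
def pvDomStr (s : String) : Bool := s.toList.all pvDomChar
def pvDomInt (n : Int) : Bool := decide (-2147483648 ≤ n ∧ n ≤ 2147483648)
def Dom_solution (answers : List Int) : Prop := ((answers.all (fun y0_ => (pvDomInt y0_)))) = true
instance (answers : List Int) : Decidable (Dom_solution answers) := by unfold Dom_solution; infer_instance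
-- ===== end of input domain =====

-- B replaces A's per-answer comparisons against the three cyclic patterns by one
-- bucketing pass (a dict keyed by (index mod 40, answer)) followed by 40 lookups
-- per pattern; objective: alternative (same O(n) cost, different mechanism).

-- ===== PORT A =====
-- A: one loop over range(len(answers)) updating three counters, then an append loop over the scores.
def solution (answers : List Int) : List Int :=
  let answer1 : List Int := [1,2,3,4,5]
  let answer2 : List Int := [2,1,2,3,2,4,2,5]
  let answer3 : List Int := [3,3,1,1,2,2,4,4,5,5]
  let s := (PySem.List.pyRange 0 (PySem.List.len answers)).foldl
    (fun (s : Int × Int × Int) i =>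
      -- answers[i] and answerk[i%lenk] are always in range, so pyGetD is exact here
      (if PySem.List.pyGetD answer1 (PySem.Int.mod i (PySem.List.len answer1)) 0
            = PySem.List.pyGetD answers i 0 then s.1 + 1 else s.1,
       if PySem.List.pyGetD answer2 (PySem.Int.mod i (PySem.List.len answer2)) 0
            = PySem.List.pyGetD answers i 0 then s.2.1 + 1 else s.2.1,
       if PySem.List.pyGetD answer3 (PySem.Int.mod i (PySem.List.len answer3)) 0
            = PySem.List.pyGetD answers i 0 then s.2.2 + 1 else s.2.2)) (0, 0, 0)
  let scores : List Int := [s.1, s.2.1, s.2.2]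
  (PySem.List.enumerate scores).foldl
    (fun acc ps =>
      if ps.2 = (PySem.List.max? scores (fun x => x)).getD 0 then acc ++ [ps.1 + 1] else acc) []

-- ===== PORT B =====
-- cnt[(i % 40, a)] = cnt.get((i % 40, a), 0) + 1
def pvBucket (answers : List Int) : PySem.Dict (Int × Int) Int :=
  (PySem.List.enumerate answers).foldl
    (fun (d : PySem.Dict (Int × Int) Int) ia =>
      d.insert (PySem.Int.mod ia.1 40, ia.2)
        (d.getD (PySem.Int.mod ia.1 40, ia.2) 0 + 1))
    PySem.Dict.empty

-- sum(cnt.get((r, p[r % len(p)]), 0) for r in range(40))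
def pvScore (cnt : PySem.Dict (Int × Int) Int) (p : List Int) : Int :=
  (PySem.List.pyRange 0 40).foldl
    (fun s r => s + cnt.getD (r, PySem.List.pyGetD p (PySem.Int.mod r (PySem.List.len p)) 0) 0) 0

def solution_alt (answers : List Int) : List Int :=
  let P1 : List Int := [1,2,3,4,5]
  let P2 : List Int := [2,1,2,3,2,4,2,5]
  let P3 : List Int := [3,3,1,1,2,2,4,4,5,5]
  let cnt := pvBucket answers
  let scores : List Int := [pvScore cnt P1, pvScore cnt P2, pvScore cnt P3]
  let m := (PySem.List.max? scores (fun x => x)).getD 0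
  (PySem.List.pyRange 0 3).foldl
    (fun acc i => if PySem.List.pyGetD scores i 0 = m then acc ++ [i + 1] else acc) []

-- ===== PRECONDITION & SPEC =====
def Spec_solution (answers : List Int) (out : List Int) : Prop := out = solution_alt answers
instance (answers : List Int) (out : List Int) : Decidable (Spec_solution answers out) := by unfold Spec_solution; infer_instance

-- ===== CLAIM (what is proved, stated in full; the proofs are below) =====
def Claim_equal_solution : Prop := ∀ (answers : List Int), Dom_solution answers → Spec_solution answers (solution answers)

-- ===== LEMMAS AND PROOFS =====

-- A's combined triple-counter fold splits into three independent single-counter folds.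
theorem foldl_triple_split (answers : List Int) (p1 p2 p3 : List Int) (l : List Int) :
    ∀ s1 s2 s3 : Int,
      l.foldl
        (fun (s : Int × Int × Int) i =>
          (if PySem.List.pyGetD p1 (PySem.Int.mod i (PySem.List.len p1)) 0
                = PySem.List.pyGetD answers i 0 then s.1 + 1 else s.1,
           if PySem.List.pyGetD p2 (PySem.Int.mod i (PySem.List.len p2)) 0
                = PySem.List.pyGetD answers i 0 then s.2.1 + 1 else s.2.1,
           if PySem.List.pyGetD p3 (PySem.Int.mod i (PySem.List.len p3)) 0
                = PySem.List.pyGetD answers i 0 then s.2.2 + 1 else s.2.2)) (s1, s2, s3)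
      = (l.foldl (fun s i => if PySem.List.pyGetD p1 (PySem.Int.mod i (PySem.List.len p1)) 0
                = PySem.List.pyGetD answers i 0 then s + 1 else s) s1,
         l.foldl (fun s i => if PySem.List.pyGetD p2 (PySem.Int.mod i (PySem.List.len p2)) 0
                = PySem.List.pyGetD answers i 0 then s + 1 else s) s2,
         l.foldl (fun s i => if PySem.List.pyGetD p3 (PySem.Int.mod i (PySem.List.len p3)) 0
                = PySem.List.pyGetD answers i 0 then s + 1 else s) s3) := by
  induction l with
  | nil => intro s1 s2 s3; rfl
  | cons x t ih => intro s1 s2 s3; simp only [List.foldl_cons, ih]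

-- sum over a Nodup list of the indicator of one pair-valued key
theorem sum_ind_not_mem (L : List Int) (m c : Int) (f : Int → Int) (hm : m ∉ L) :
    (L.map (fun r => if (m, c) = (r, f r) then (1:Int) else 0)).sum = 0 := by
  induction L with
  | nil => rfl
  | cons r t ih =>
      simp only [List.mem_cons, not_or] at hm
      simp only [List.map_cons, List.sum_cons, ih hm.2]
      rw [if_neg (fun e => hm.1 (congrArg Prod.fst e))]
      ring

theorem sum_ind (L : List Int) (m c : Int) (f : Int → Int) (hm : m ∈ L) (hnd : L.Nodup) :
    (L.map (fun r => if (m, c) = (r, f r) then (1:Int) else 0)).sum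
      = if f m = c then 1 else 0 := by
  induction L with
  | nil => cases hm
  | cons r t ih =>
      simp only [List.map_cons, List.sum_cons]
      rcases List.mem_cons.mp hm with h | h
      · subst h
        rw [sum_ind_not_mem t m c f (List.nodup_cons.mp hnd).1]
        have : ((m, c) = (m, f m)) ↔ (f m = c) := by
          constructor
          · intro e; exact ((Prod.ext_iff.mp e).2).symm
          · intro e; rw [e]
        rw [if_congr this rfl rfl]
        ring
      · have hr : m ≠ r := fun e => by
          subst e; exact (List.nodup_cons.mp hnd).1 h
        rw [if_neg (fun e => hr (congrArg Prod.fst e)),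
            ih h (List.nodup_cons.mp hnd).2]
        ring

-- Σ_{r=0}^{39} count of bucket (r, f r) = count of pairs whose answer matches f at their residue
theorem sum_count_eq (f : Int → Int) (l : List (Int × Int)) :
    ((PySem.List.pyRange 0 40).map
        (fun r => ((l.map (fun ia => (PySem.Int.mod ia.1 40, ia.2))).count (r, f r) : Int))).sum
      = (l.countP (fun ia => f (PySem.Int.mod ia.1 40) == ia.2) : Int) := by
  induction l with
  | nil => simp
  | cons a t ih =>
      simp only [List.map_cons, List.count_cons, List.countP_cons, beq_iff_eq]
      have key : ((PySem.List.pyRange 0 40).map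
          (fun r => (((t.map (fun ia => (PySem.Int.mod ia.1 40, ia.2))).count (r, f r)
              + if (PySem.Int.mod a.1 40, a.2) = (r, f r) then 1 else 0 : Nat) : Int))).sum
          = ((PySem.List.pyRange 0 40).map
              (fun r => ((t.map (fun ia => (PySem.Int.mod ia.1 40, ia.2))).count (r, f r) : Int))).sum
            + ((PySem.List.pyRange 0 40).map
              (fun r => if (PySem.Int.mod a.1 40, a.2) = (r, f r) then (1:Int) else 0)).sum := by
        induction (PySem.List.pyRange 0 40 : List Int) with
        | nil => rfl
        | cons r L ihL =>
            simp only [List.map_cons, List.sum_cons, ihL]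
            push_cast
            split <;> ring
      have hmem : PySem.Int.mod a.1 40 ∈ (PySem.List.pyRange 0 40 : List Int) := by
        rw [PySem.List.mem_pyRange_one]
        have h40 : (0:Int) < 40 := by norm_num
        rw [PySem.Int.mod_eq_emod_of_pos h40]
        exact ⟨Int.emod_nonneg _ (by norm_num), Int.emod_lt_of_pos _ h40⟩
      have hnd : (PySem.List.pyRange 0 40 : List Int).Nodup := by decide
      rw [key, sum_ind _ _ _ f hmem hnd, ih]
      push_cast
      ring

-- a fold inserting under a computed key is a fold over the mapped keys
theorem pvFoldlKey (l : List (Int × Int)) (d : PySem.Dict (Int × Int) Int) :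
    l.foldl
      (fun (d : PySem.Dict (Int × Int) Int) ia =>
        d.insert (PySem.Int.mod ia.1 40, ia.2)
          (d.getD (PySem.Int.mod ia.1 40, ia.2) 0 + 1)) d
    = (l.map (fun ia => (PySem.Int.mod ia.1 40, ia.2))).foldl
        (fun (d : PySem.Dict (Int × Int) Int) x => d.insert x (d.getD x 0 + 1)) d := by
  induction l generalizing d with
  | nil => rfl
  | cons a t ih => simp only [List.foldl_cons, List.map_cons, ih]

-- B's bucket lookup is a count over the keyed pairs
theorem bucket_getD (answers : List Int) (v : Int × Int) :
    (pvBucket answers).getD v 0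
      = (((PySem.List.enumerate answers).map
            (fun ia => (PySem.Int.mod ia.1 40, ia.2))).count v : Int) := by
  unfold pvBucket
  rw [pvFoldlKey (PySem.List.enumerate answers) PySem.Dict.empty]
  rw [PySem.Dict.getD_foldl_insert_add_one]
  simp [PySem.Dict.getD_empty]

-- the mod-40 bucket residue collapses to the pattern's own modulus
theorem mod_mod_collapse (i L : Int) (hL : 0 < L) (hdvd : L ∣ 40) :
    PySem.Int.mod (PySem.Int.mod i 40) L = PySem.Int.mod i L := by
  rw [PySem.Int.mod_eq_emod_of_pos (by norm_num : (0:Int) < 40),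
      PySem.Int.mod_eq_emod_of_pos hL, PySem.Int.mod_eq_emod_of_pos hL]
  exact Int.emod_emod_of_dvd i hdvd

-- B's per-pattern score equals A's per-pattern tally
theorem score_eq_tally (answers p : List Int) (hL : 0 < PySem.List.len p)
    (hdvd : PySem.List.len p ∣ 40) :
    pvScore (pvBucket answers) p
      = (PySem.List.pyRange 0 (PySem.List.len answers)).foldl
          (fun s i => if PySem.List.pyGetD p (PySem.Int.mod i (PySem.List.len p)) 0
                = PySem.List.pyGetD answers i 0 then s + 1 else s) 0 := by
  -- right side: the tally is a countP over enumerate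
  have hA : (PySem.List.pyRange 0 (PySem.List.len answers)).foldl
      (fun s i => if PySem.List.pyGetD p (PySem.Int.mod i (PySem.List.len p)) 0
            = PySem.List.pyGetD answers i 0 then s + 1 else s) (0:Int)
      = ((PySem.List.enumerate answers).countP
          (fun ia => PySem.List.pyGetD p (PySem.Int.mod ia.1 (PySem.List.len p)) 0 == ia.2) : Int) := by
    rw [PySem.List.enumerate_eq_map_pyRange answers 0, List.countP_map]
    rw [show (fun s i => if PySem.List.pyGetD p (PySem.Int.mod i (PySem.List.len p)) 0
            = PySem.List.pyGetD answers i 0 then s + 1 else s)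
        = (fun (s : Int) i => if ((fun ia : Int × Int =>
              PySem.List.pyGetD p (PySem.Int.mod ia.1 (PySem.List.len p)) 0 == ia.2) ∘
              (fun j => (j, PySem.List.pyGetD answers j 0))) i then s + 1 else s) from by
      funext s i
      simp [Function.comp]]
    rw [PySem.List.foldl_if_add_one]
    simp
  rw [hA]
  -- left side: foldl_add, bucket lookups are counts, then sum_count_eq
  unfold pvScore
  rw [PySem.List.foldl_add]
  simp only [bucket_getD]
  rw [sum_count_eq (fun r => PySem.List.pyGetD p (PySem.Int.mod r (PySem.List.len p)) 0)
        (PySem.List.enumerate answers)]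
  rw [List.countP_congr (fun ia _ => by
    rw [mod_mod_collapse ia.1 (PySem.List.len p) hL hdvd])]
  ring

-- the two result-building passes agree once the three scores agree
theorem tail_eq (a b c : Int) :
    (PySem.List.enumerate [a, b, c]).foldl
      (fun acc ps =>
        if ps.2 = (PySem.List.max? [a, b, c] (fun x => x)).getD 0 then acc ++ [ps.1 + 1] else acc) []
    = (PySem.List.pyRange 0 3).foldl
      (fun acc i => if PySem.List.pyGetD [a, b, c] i 0
          = (PySem.List.max? [a, b, c] (fun x => x)).getD 0 then acc ++ [i + 1] else acc) [] := by
  have h3 : (PySem.List.pyRange 0 3 : List Int) = [0, 1, 2] := by decide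
  rw [h3]
  simp [PySem.List.enumerate, PySem.List.pyGetD]

-- ===== VERDICT (by name: the statement is the Claim_ definition above) =====
theorem solution_spec : Claim_equal_solution := by
  intro answers _
  unfold Spec_solution solution solution_alt
  simp only
  rw [foldl_triple_split]
  rw [← score_eq_tally answers [1,2,3,4,5] (by decide) (by decide),
      ← score_eq_tally answers [2,1,2,3,2,4,2,5] (by decide) (by decide),
      ← score_eq_tally answers [3,3,1,1,2,2,4,4,5,5] (by decide) (by decide)]
  exact tail_eq _ _ _
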